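-- pv_equiv track=rewrite | github.com/dylan-alexander-nice/NiCE-coday-2025 | src/task_two/app.py | find_harmonized_group_length
-- ===== SOURCE A (Python) =====
-- def find_harmonized_group_length(arr: list[int], typeA: int, typeB: int) -> int:
--     """
--     Find longest harmonized group with pattern A^k B^m A^k.
--
--     Strategy:
--     - Count occurrences of typeA and typeB in array
--     - Try all possible values of k (parts 1 & 3) and m (part 2)
--     - For each (k, m), check if we can form the pattern as a subsequence
--
--     Args:
--         arr: Array of crystal identifiers
--         typeA: Type for parts 1 and 3
--         typeB: Type for part 2 (middle)
--
--     Returns: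
--         Length of longest harmonized group (2k + m)
--     """
--     n = len(arr)
--
--     # Precompute: For each position, count how many of typeA/typeB we've seen
--     count_A = [0] * (n + 1)  # count_A[i] = number of typeA in arr[0:i]
--     count_B = [0] * (n + 1)
--
--     for i in range(n):
--         count_A[i + 1] = count_A[i] + (1 if arr[i] == typeA else 0)
--         count_B[i + 1] = count_B[i] + (1 if arr[i] == typeB else 0)
--
--     total_A = count_A[n]
--     total_B = count_B[n]
--
--     max_length = 0
--
--     # Try all possible k values (for parts 1 and 3)
--     max_k = total_A // 2  # Need at least 2k instances of typeA
--
--     for k in range(1, max_k + 1):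
--         # For this k, find the best position to split into part1, part2, part3
--         # We need: k of typeA, then some of typeB, then k of typeA
--
--         # Try different split points
--         # Part 1 ends at position end1 (has k instances of typeA)
--         # Part 2 ends at position end2 (has m instances of typeB)
--         # Part 3 ends at position n (has k instances of typeA)
--
--         # Find earliest position where we have k instances of typeA
--         end1 = -1
--         for i in range(n + 1):
--             if count_A[i] >= k:
--                 end1 = i
--                 break
--
--         if end1 == -1:
--             continue
--
--         # From end1 onwards, we need k more instances of typeA for part 3
--         remaining_A_needed = k
--         remaining_A_available = total_A - k
--
--         if remaining_A_available < remaining_A_needed: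
--             continue
--
--         # Try different amounts of typeB in the middle (m)
--         for end2 in range(end1, n + 1):
--             # Count typeB between end1 and end2 (part 2)
--             m = count_B[end2] - count_B[end1]
--
--             # Count typeA between end2 and n (potential part 3)
--             typeA_in_part3 = count_A[n] - count_A[end2]
--
--             # Check if we have enough typeA for part 3
--             if typeA_in_part3 >= k:
--                 # Valid pattern: k typeA + m typeB + k typeA
--                 length = 2 * k + m
--                 max_length = max(max_length, length)
--
--     return max_length
-- ===== SOURCE B (Python) =====
-- def find_harmonized_group_length(arr: list[int], typeA: int, typeB: int) -> int:
--     """Alternative implementation: per k the optimal split is determined by the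
--     positions of the k-th typeA occurrence from the left and from the right."""
--     posA = [i for i, x in enumerate(arr) if x == typeA]
--     pref_B = [0]
--     for x in arr:
--         pref_B.append(pref_B[-1] + (1 if x == typeB else 0))
--     tA = len(posA)
--     best = 0
--     for k in range(1, tA // 2 + 1):
--         end1 = posA[k - 1] + 1          # earliest prefix containing k typeA
--         end2 = posA[tA - k]             # latest split leaving k typeA after it
--         best = max(best, 2 * k + pref_B[end2] - pref_B[end1])
--     return best
-- ===== Notes on version B (the rewrite author's own statement) =====
-- stated objective: alternative
-- what changed: Replaces A's per-k linear search for end1 and per-k inner scan over all end2 with a single precomputed list of typeA positions: since prefix counts are monotone, for each k the optimal split is read off directly as posA[k-1]+1 and posA[tA-k], eliminating both inner loops (O(n) vs A's O(n*countA); not measurably faster on the generated inputs, which contain few typeA matches).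
import Mathlib
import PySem

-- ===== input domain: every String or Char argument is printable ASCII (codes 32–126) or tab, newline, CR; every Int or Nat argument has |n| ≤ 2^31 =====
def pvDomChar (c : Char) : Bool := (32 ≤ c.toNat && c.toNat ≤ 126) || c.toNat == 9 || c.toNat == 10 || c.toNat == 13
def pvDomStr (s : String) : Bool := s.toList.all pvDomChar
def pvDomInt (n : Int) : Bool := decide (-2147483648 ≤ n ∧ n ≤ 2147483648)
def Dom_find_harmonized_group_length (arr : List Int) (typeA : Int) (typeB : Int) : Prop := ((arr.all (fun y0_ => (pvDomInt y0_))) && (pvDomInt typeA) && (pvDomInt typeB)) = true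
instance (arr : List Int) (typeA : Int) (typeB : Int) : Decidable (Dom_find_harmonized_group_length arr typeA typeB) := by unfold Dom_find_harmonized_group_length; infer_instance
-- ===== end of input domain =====

-- B replaces A's per-k linear search for end1 and per-k scan over all end2 by a
-- precomputed list of typeA positions from which each k's optimal split is read off directly.

-- ===== PORT A =====
-- the prefix-count loop: prefC t xs c is the list [c, c + cnt(1), ...] Python builds into count_A / count_B
def prefC (t : Int) : List Int → Int → List Int
  | [], c => [c]
  | x :: xs, c => c :: prefC t xs (c + (if x = t then 1 else 0))

def find_harmonized_group_length (arr : List Int) (typeA : Int) (typeB : Int) : Int :=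
  let n : Int := arr.length
  let countA := prefC typeA arr 0
  let countB := prefC typeB arr 0
  let totalA := PySem.List.pyGetD countA n 0
  let _totalB := PySem.List.pyGetD countB n 0
  let maxK := PySem.Int.floordiv totalA 2
  (PySem.List.pyRange 1 (maxK + 1) 1).foldl (fun maxLength k =>
    -- 'end1 = -1; for i in range(n+1): if count_A[i] >= k: end1 = i; break'
    let end1 : Int := ((PySem.List.pyRange 0 (n + 1) 1).find?
        (fun i => decide (k ≤ PySem.List.pyGetD countA i 0))).getD (-1)
    if end1 == -1 then maxLength
    else if totalA - k < k then maxLength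
    else
      (PySem.List.pyRange end1 (n + 1) 1).foldl (fun acc end2 =>
        let m := PySem.List.pyGetD countB end2 0 - PySem.List.pyGetD countB end1 0
        let typeAInPart3 := PySem.List.pyGetD countA n 0 - PySem.List.pyGetD countA end2 0
        if k ≤ typeAInPart3 then max acc (2 * k + m) else acc) maxLength) 0

-- ===== PORT B =====
-- '[i for i, x in enumerate(arr) if x == t]'
def posIdx (t : Int) (xs : List Int) : List Int :=
  ((PySem.List.enumerate xs 0).filter (fun p => p.2 == t)).map (fun p => p.1)

def find_harmonized_group_length_alt (arr : List Int) (typeA : Int) (typeB : Int) : Int :=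
  let posA := posIdx typeA arr
  let prefB := prefC typeB arr 0
  let tA : Int := posA.length
  (PySem.List.pyRange 1 (PySem.Int.floordiv tA 2 + 1) 1).foldl (fun best k =>
    let end1 := PySem.List.pyGetD posA (k - 1) 0 + 1
    let end2 := PySem.List.pyGetD posA (tA - k) 0
    max best (2 * k + PySem.List.pyGetD prefB end2 0 - PySem.List.pyGetD prefB end1 0)) 0

-- ===== PRECONDITION & SPEC =====
def Spec_find_harmonized_group_length (arr : List Int) (typeA : Int) (typeB : Int) (out : Int) : Prop := out = find_harmonized_group_length_alt arr typeA typeB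
instance (arr : List Int) (typeA : Int) (typeB : Int) (out : Int) : Decidable (Spec_find_harmonized_group_length arr typeA typeB out) := by unfold Spec_find_harmonized_group_length; infer_instance

-- ===== CLAIM (what is proved, stated in full; the proofs are below) =====
def Claim_equal_find_harmonized_group_length : Prop := ∀ (arr : List Int) (typeA : Int) (typeB : Int), Dom_find_harmonized_group_length arr typeA typeB → Spec_find_harmonized_group_length arr typeA typeB (find_harmonized_group_length arr typeA typeB)

-- ===== LEMMAS AND PROOFS =====

theorem prefC_length (t : Int) (xs : List Int) (c : Int) : (prefC t xs c).length = xs.length + 1 := by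
  induction xs generalizing c with
  | nil => simp [prefC]
  | cons x xs ih => simp [prefC, ih]

theorem prefC_getD (t : Int) (xs : List Int) (c : Int) (j : Nat) (hj : j ≤ xs.length) :
    (prefC t xs c).getD j 0 = c + ((xs.take j).count t : Int) := by
  induction xs generalizing c j with
  | nil =>
    have : j = 0 := by simpa using hj
    subst this; simp [prefC]
  | cons x xs ih =>
    cases j with
    | zero => simp [prefC]
    | succ j =>
      simp only [prefC, List.getD_cons_succ]
      rw [ih _ j (by simpa using hj)]
      rw [List.take_succ_cons, List.count_cons]
      by_cases hx : x = t
      · simp [hx]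
        ring
      · simp [hx]

theorem cnt_mono (t : Int) (xs : List Int) {j j' : Nat} (h : j ≤ j') :
    (xs.take j).count t ≤ (xs.take j').count t := by
  have heq : xs.take j = (xs.take j').take j := by
    rw [List.take_take]; congr 1; omega
  rw [heq]
  exact (List.take_sublist _ _).count_le t

theorem pyGetD_toNat {xs : List Int} {i : Int} (d : Int) (h0 : 0 ≤ i) (h1 : i < (xs.length : Int)) :
    PySem.List.pyGetD xs i d = xs.getD i.toNat d := by
  rw [PySem.List.pyGetD_eq_getElem xs d h0 h1, List.getD_eq_getElem]

theorem pyGetD_prefC (t : Int) (xs : List Int) (i : Int) (h0 : 0 ≤ i) (h1 : i ≤ (xs.length : Int)) :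
    PySem.List.pyGetD (prefC t xs 0) i 0 = ((xs.take i.toNat).count t : Int) := by
  rw [pyGetD_toNat 0 h0 (by rw [prefC_length]; push_cast; omega)]
  rw [prefC_getD t xs 0 i.toNat (by omega)]
  ring

-- posIdx with a general enumerate start (proof-only helper)
def posAuxP (t : Int) (xs : List Int) (s : Int) : List Int :=
  ((PySem.List.enumerate xs s).filter (fun p => p.2 == t)).map (fun p => p.1)

theorem posIdx_eq_posAuxP (t : Int) (xs : List Int) : posIdx t xs = posAuxP t xs 0 := rfl

theorem posAuxP_cons (t x : Int) (xs : List Int) (s : Int) :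
    posAuxP t (x :: xs) s = if x = t then s :: posAuxP t xs (s + 1) else posAuxP t xs (s + 1) := by
  simp only [posAuxP, PySem.List.enumerate_cons, List.filter_cons]
  by_cases hx : x = t <;> simp [hx]

theorem posAuxP_length (t : Int) (xs : List Int) : ∀ s : Int, (posAuxP t xs s).length = xs.count t := by
  induction xs with
  | nil => intro s; simp [posAuxP, PySem.List.enumerate_nil]
  | cons x xs ih =>
    intro s
    rw [posAuxP_cons, List.count_cons]
    by_cases hx : x = t <;> simp [hx, ih]

theorem posIdx_length (t : Int) (xs : List Int) : (posIdx t xs).length = xs.count t := by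
  rw [posIdx_eq_posAuxP]; exact posAuxP_length t xs 0

theorem posAuxP_spec (t : Int) (xs : List Int) : ∀ (s : Int) (j : Nat), 0 ≤ s →
    j < (posAuxP t xs s).length →
    ∃ q : Nat, (posAuxP t xs s).getD j 0 = s + (q : Int) ∧ q < xs.length ∧
      (xs.take q).count t = j ∧ (xs.take (q + 1)).count t = j + 1 := by
  induction xs with
  | nil => intro s j _ hj; simp [posAuxP, PySem.List.enumerate_nil] at hj
  | cons x xs ih =>
    intro s j hs hj
    rw [posAuxP_cons] at hj ⊢
    by_cases hx : x = t
    · simp only [hx, if_pos] at hj ⊢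
      cases j with
      | zero =>
        refine ⟨0, by simp, by simp, by simp, ?_⟩
        simp [List.take_succ_cons]
      | succ j =>
        have hj' : j < (posAuxP t xs (s + 1)).length := by simpa using hj
        obtain ⟨q, hqv, hql, hc1, hc2⟩ := ih (s + 1) j (by omega) hj'
        refine ⟨q + 1, ?_, by simp; omega, ?_, ?_⟩
        · rw [List.getD_cons_succ, hqv]; push_cast; ring
        · rw [List.take_succ_cons, List.count_cons]; simp [hc1]
        · rw [List.take_succ_cons, List.count_cons]; simp [hc2]
    · simp only [hx, ite_false] at hj ⊢
      obtain ⟨q, hqv, hql, hc1, hc2⟩ := ih (s + 1) j (by omega) hj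
      refine ⟨q + 1, ?_, by simp; omega, ?_, ?_⟩
      · rw [hqv]; push_cast; ring
      · rw [List.take_succ_cons, List.count_cons]; simp [hx, hc1]
      · rw [List.take_succ_cons, List.count_cons]; simp [hx, hc2]

theorem posIdx_spec (t : Int) (xs : List Int) (j : Nat) (hj : j < (posIdx t xs).length) :
    ∃ q : Nat, (posIdx t xs).getD j 0 = (q : Int) ∧ q < xs.length ∧
      (xs.take q).count t = j ∧ (xs.take (q + 1)).count t = j + 1 := by
  rw [posIdx_eq_posAuxP] at hj ⊢
  obtain ⟨q, hqv, h⟩ := posAuxP_spec t xs 0 j le_rfl hj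
  exact ⟨q, by rw [hqv]; ring, h⟩

-- find? on range(a, b) returns the least element satisfying the predicate
theorem find?_pyRange_aux (P : Int → Bool) (b : Int) : ∀ (m : Nat) (a e : Int),
    (e - a).toNat = m → a ≤ e → e < b → P e = true → (∀ i, a ≤ i → i < e → P i = false) →
    (PySem.List.pyRange a b 1).find? P = some e := by
  intro m
  induction m with
  | zero =>
    intro a e hm hae heb hPe _
    have : a = e := by omega
    subst this
    rw [PySem.List.pyRange_one_cons heb]
    simp [hPe]
  | succ m ih =>
    intro a e hm hae heb hPe hmin
    have hab : a < b := by omega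
    rw [PySem.List.pyRange_one_cons hab]
    have hPa : P a = false := hmin a le_rfl (by omega)
    simp only [List.find?_cons, hPa]
    exact ih (a + 1) e (by omega) (by omega) heb hPe (fun i h1 h2 => hmin i (by omega) h2)

theorem find?_pyRange_eq_some (P : Int → Bool) {a b e : Int} (hae : a ≤ e) (heb : e < b)
    (hPe : P e = true) (hmin : ∀ i, a ≤ i → i < e → P i = false) :
    (PySem.List.pyRange a b 1).find? P = some e :=
  find?_pyRange_aux P b (e - a).toNat a e rfl hae heb hPe hmin

-- the conditional running-max loop
theorem foldl_ifmax_ge_acc (P : Int → Prop) [DecidablePred P] (g : Int → Int) :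
    ∀ (L : List Int) (acc : Int), acc ≤ L.foldl (fun a x => if P x then max a (g x) else a) acc := by
  intro L
  induction L with
  | nil => intro acc; simp
  | cons y L ih =>
    intro acc
    simp only [List.foldl_cons]
    by_cases hy : P y
    · simp only [hy, if_pos]
      exact le_trans (le_max_left _ _) (ih _)
    · simp only [hy, ite_false]
      exact ih _
  
theorem foldl_ifmax_ge_elem (P : Int → Prop) [DecidablePred P] (g : Int → Int) :
    ∀ (L : List Int) (acc x : Int), x ∈ L → P x →
      g x ≤ L.foldl (fun a x => if P x then max a (g x) else a) acc := by
  intro L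
  induction L with
  | nil => intro acc x hx; simp at hx
  | cons y L ih =>
    intro acc x hx hPx
    simp only [List.foldl_cons]
    rcases List.mem_cons.mp hx with h | h
    · subst h
      simp only [hPx, if_pos]
      exact le_trans (le_max_right _ _) (foldl_ifmax_ge_acc P g L _)
    · by_cases hy : P y
      · simp only [hy, if_pos]; exact ih _ x h hPx
      · simp only [hy, ite_false]; exact ih _ x h hPx

theorem foldl_ifmax_le (P : Int → Prop) [DecidablePred P] (g : Int → Int) (M : Int) :
    ∀ (L : List Int) (acc : Int), (∀ x ∈ L, P x → g x ≤ M) →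
      L.foldl (fun a x => if P x then max a (g x) else a) acc ≤ max acc M := by
  intro L
  induction L with
  | nil => intro acc _; simp
  | cons y L ih =>
    intro acc hub
    simp only [List.foldl_cons]
    by_cases hy : P y
    · simp only [hy, if_pos]
      have h1 : g y ≤ M := hub y (List.mem_cons_self ..) hy
      have h2 := ih (max acc (g y)) (fun x hx => hub x (List.mem_cons_of_mem _ hx))
      calc List.foldl _ (max acc (g y)) L ≤ max (max acc (g y)) M := h2
        _ ≤ max acc M := by omega
    · simp only [hy, ite_false]
      exact ih acc (fun x hx => hub x (List.mem_cons_of_mem _ hx))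

theorem foldl_ifmax_eq (P : Int → Prop) [DecidablePred P] (g : Int → Int) (L : List Int)
    (acc b : Int) (hb : b ∈ L) (hPb : P b) (hub : ∀ x ∈ L, P x → g x ≤ g b) :
    L.foldl (fun a x => if P x then max a (g x) else a) acc = max acc (g b) := by
  apply le_antisymm
  · exact foldl_ifmax_le P g (g b) L acc hub
  · have h1 := foldl_ifmax_ge_acc P g L acc
    have h2 := foldl_ifmax_ge_elem P g L acc b hb hPb
    omega

-- ===== VERDICT (by name: the statement is the Claim_ definition above) =====
theorem find_harmonized_group_length_spec : Claim_equal_find_harmonized_group_length := by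
  intro arr typeA typeB _
  unfold Spec_find_harmonized_group_length
  simp only [find_harmonized_group_length, find_harmonized_group_length_alt]
  have hTot : PySem.List.pyGetD (prefC typeA arr 0) (arr.length : Int) 0 = ((arr.count typeA : Nat) : Int) := by
    rw [pyGetD_prefC typeA arr _ (by positivity) le_rfl]
    simp
  rw [hTot, posIdx_length]
  apply List.foldl_ext
  intro acc k hk
  obtain ⟨h1k, hkM⟩ := PySem.List.mem_pyRange_one.mp hk
  have hk2 : k * 2 ≤ ((arr.count typeA : Nat) : Int) :=
    (PySem.Int.le_floordiv_iff_mul_le (by norm_num)).mp (by omega)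
  have hlen : (posIdx typeA arr).length = arr.count typeA := posIdx_length typeA arr
  -- the (k-1)-th and (tA-k)-th typeA positions
  have hj1lt : (k - 1).toNat < (posIdx typeA arr).length := by rw [hlen]; omega
  obtain ⟨q1, hq1v, hq1l, hq1c, hq1c'⟩ := posIdx_spec typeA arr _ hj1lt
  have hj2lt : (((arr.count typeA : Nat) : Int) - k).toNat < (posIdx typeA arr).length := by
    rw [hlen]; omega
  obtain ⟨q2, hq2v, hq2l, hq2c, hq2c'⟩ := posIdx_spec typeA arr _ hj2lt
  have hc1 : ((arr.take q1).count typeA : Int) = k - 1 := by rw [hq1c]; omega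
  have hc1' : ((arr.take (q1 + 1)).count typeA : Int) = k := by rw [hq1c']; push_cast; omega
  have hc2 : ((arr.take q2).count typeA : Int) = ((arr.count typeA : Nat) : Int) - k := by
    rw [hq2c]; omega
  have hc2' : ((arr.take (q2 + 1)).count typeA : Int) = ((arr.count typeA : Nat) : Int) - k + 1 := by
    rw [hq2c']; push_cast; omega
  have hq12 : q1 < q2 := by
    by_contra h
    have hm := cnt_mono typeA arr (show q2 ≤ q1 by omega)
    have hm' : ((arr.take q2).count typeA : Int) ≤ ((arr.take q1).count typeA : Int) := by
      exact_mod_cast hm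
    omega
  -- A's linear search finds position q1 + 1
  have hfind : (PySem.List.pyRange 0 ((arr.length : Int) + 1) 1).find?
      (fun i => decide (k ≤ PySem.List.pyGetD (prefC typeA arr 0) i 0)) = some ((q1 : Int) + 1) := by
    apply find?_pyRange_eq_some
    · omega
    · have : (q1 : Int) < (arr.length : Int) := by exact_mod_cast hq1l
      omega
    · have hle : ((q1 : Int) + 1) ≤ (arr.length : Int) := by
        have : (q1 : Int) < (arr.length : Int) := by exact_mod_cast hq1l
        omega
      rw [pyGetD_prefC typeA arr _ (by omega) hle]
      have ht : ((q1 : Int) + 1).toNat = q1 + 1 := by omega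
      rw [ht, hc1']
      simp
    · intro i h0i hie
      have hql : (q1 : Int) < (arr.length : Int) := by exact_mod_cast hq1l
      rw [pyGetD_prefC typeA arr i h0i (by omega)]
      have hm := cnt_mono typeA arr (show i.toNat ≤ q1 by omega)
      have hm' : ((arr.take i.toNat).count typeA : Int) ≤ ((arr.take q1).count typeA : Int) := by
        exact_mod_cast hm
      simp only [decide_eq_false_iff_not, not_le]
      omega
  rw [hfind, Option.getD_some]
  rw [if_neg (show ¬((((q1 : Int) + 1) == -1) = true) by simp only [beq_iff_eq]; omega)]
  rw [if_neg (show ¬(((arr.count typeA : Nat) : Int) - k < k) by omega)]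
  -- B's direct reads
  have hE1 : PySem.List.pyGetD (posIdx typeA arr) (k - 1) 0 = (q1 : Int) := by
    rw [pyGetD_toNat 0 (by omega) (by rw [hlen]; omega)]
    exact hq1v
  have hE2 : PySem.List.pyGetD (posIdx typeA arr) (((arr.count typeA : Nat) : Int) - k) 0 = (q2 : Int) := by
    rw [pyGetD_toNat 0 (by omega) (by rw [hlen]; omega)]
    exact hq2v
  rw [hE1, hE2]
  have hq2len : (q2 : Int) < (arr.length : Int) := by exact_mod_cast hq2l
  have hq1len : (q1 : Int) < (arr.length : Int) := by exact_mod_cast hq1l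
  have hB2 : PySem.List.pyGetD (prefC typeB arr 0) (q2 : Int) 0 = ((arr.take q2).count typeB : Int) := by
    rw [pyGetD_prefC typeB arr _ (by omega) (by omega)]
    simp
  have hB1 : PySem.List.pyGetD (prefC typeB arr 0) ((q1 : Int) + 1) 0
      = ((arr.take (q1 + 1)).count typeB : Int) := by
    rw [pyGetD_prefC typeB arr _ (by omega) (by omega)]
    have ht : ((q1 : Int) + 1).toNat = q1 + 1 := by omega
    rw [ht]
  rw [hB2, hB1]
  refine (foldl_ifmax_eq
      (fun x => k ≤ ((arr.count typeA : Nat) : Int) - PySem.List.pyGetD (prefC typeA arr 0) x 0)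
      (fun x => 2 * k + (PySem.List.pyGetD (prefC typeB arr 0) x 0 - ((arr.take (q1 + 1)).count typeB : Int)))
      _ acc (q2 : Int) ?_ ?_ ?_).trans ?_
  · rw [PySem.List.mem_pyRange_one]
    constructor <;> omega
  · show k ≤ ((arr.count typeA : Nat) : Int) - PySem.List.pyGetD (prefC typeA arr 0) (q2 : Int) 0
    rw [pyGetD_prefC typeA arr _ (by omega) (by omega)]
    simp only [Int.toNat_natCast]
    omega
  · intro x hx hPx
    obtain ⟨hx1, hx2⟩ := PySem.List.mem_pyRange_one.mp hx
    simp only at hPx ⊢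
    rw [pyGetD_prefC typeA arr x (by omega) (by omega)] at hPx
    have hxq : x.toNat ≤ q2 := by
      by_contra h
      have hm := cnt_mono typeA arr (show q2 + 1 ≤ x.toNat by omega)
      have hm' : ((arr.take (q2 + 1)).count typeA : Int) ≤ ((arr.take x.toNat).count typeA : Int) := by
        exact_mod_cast hm
      omega
    rw [pyGetD_prefC typeB arr x (by omega) (by omega), hB2]
    have hm := cnt_mono typeB arr hxq
    have hm' : ((arr.take x.toNat).count typeB : Int) ≤ ((arr.take q2).count typeB : Int) := by
      exact_mod_cast hm
    omega
  · simp only [hB2]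
    congr 1
    ring
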